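-- pv_equiv track=rewrite | github.com/WeixinWang24/Orbit2 | src/governance/disclosure.py | _compute_safe_groups
-- ===== SOURCE A (Python) =====
-- def _compute_safe_groups(
--     tool_group: dict[str, str], tool_side_effect: dict[str, str]
-- ) -> set[str]:
--     """A group is safe iff it has at least one member AND every member has
--     `side_effect_class == "safe"`. The non-empty requirement is a hardening
--     guard (audit CRIT-1): `all()` over an empty iterable returns `True`, so
--     a momentarily-empty group name would otherwise qualify; if a write tool
--     later attached to that same group, the replayed `reveal_all_safe_request`
--     marker would surface the mutation on a subsequent turn. Requiring at
--     least one member makes the predicate robust under dynamic attachment.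
--     """
--     group_members: dict[str, list[str]] = {}
--     for name, group in tool_group.items():
--         group_members.setdefault(group, []).append(name)
--     safe: set[str] = set()
--     for group, members in group_members.items():
--         if members and all(tool_side_effect.get(m) == "safe" for m in members):
--             safe.add(group)
--     return safe
-- ===== SOURCE B (Python) =====
-- def _compute_safe_groups(
--     tool_group: dict[str, str], tool_side_effect: dict[str, str]
-- ) -> set[str]:
--     """Single accumulating pass: keep a running 'all members safe so far'
--     boolean per group instead of materialising the member lists.  A group
--     key exists in group_safe only once it has at least one member, so the
--     non-empty requirement is implicit."""
--     group_safe: dict[str, bool] = {}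
--     for name, group in tool_group.items():
--         group_safe[group] = group_safe.get(group, True) and (
--             tool_side_effect.get(name) == "safe"
--         )
--     return {g for g, ok in group_safe.items() if ok}
-- ===== Notes on version B (the rewrite author's own statement) =====
-- stated objective: simpler
-- what changed: Replaces A's two-phase build-group-member-lists-then-all() structure with one accumulating pass that folds a running per-group 'all safe so far' boolean, making the non-empty guard implicit in dict membership.
import Mathlib
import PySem

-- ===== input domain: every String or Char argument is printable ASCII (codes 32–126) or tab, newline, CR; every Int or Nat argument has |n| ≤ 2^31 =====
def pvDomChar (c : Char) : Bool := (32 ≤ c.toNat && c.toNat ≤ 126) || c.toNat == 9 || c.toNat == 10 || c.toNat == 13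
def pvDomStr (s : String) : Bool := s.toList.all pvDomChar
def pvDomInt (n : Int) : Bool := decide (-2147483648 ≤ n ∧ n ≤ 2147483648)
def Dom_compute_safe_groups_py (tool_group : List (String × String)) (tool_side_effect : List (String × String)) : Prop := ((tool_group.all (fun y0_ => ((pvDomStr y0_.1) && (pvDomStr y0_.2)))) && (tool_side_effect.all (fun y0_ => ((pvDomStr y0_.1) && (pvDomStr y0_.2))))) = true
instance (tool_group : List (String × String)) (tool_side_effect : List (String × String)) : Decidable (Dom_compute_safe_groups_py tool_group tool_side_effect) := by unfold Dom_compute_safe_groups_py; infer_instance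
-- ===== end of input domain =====

-- Program B replaces A's two-phase build-member-lists-then-all() structure with a single
-- accumulating pass keeping a running per-group boolean (objective: simpler decomposition).

-- ===== PORT A =====
def compute_safe_groups_py (tool_group : List (String × String)) (tool_side_effect : List (String × String)) : List String :=
  let tg := PySem.Dict.ofList tool_group
  let se := PySem.Dict.ofList tool_side_effect
  -- group_members.setdefault(group, []).append(name)  ==  d[group] = d.get(group, []) + [name]
  let group_members : PySem.Dict String (List String) :=
    tg.items.foldl (fun d p => d.modify p.2 [] (fun ms => ms ++ [p.1])) PySem.Dict.empty
  group_members.items.foldl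
    (fun safe p =>
      if (!p.2.isEmpty) && p.2.all (fun m => se.get? m == some "safe")
      then PySem.Set.add safe p.1 else safe)
    PySem.Set.empty

-- ===== PORT B =====
def compute_safe_groups_py_alt (tool_group : List (String × String)) (tool_side_effect : List (String × String)) : List String :=
  let se := PySem.Dict.ofList tool_side_effect
  let group_safe : PySem.Dict String Bool :=
    (PySem.Dict.ofList tool_group).items.foldl
      (fun d p => d.insert p.2 (d.getD p.2 true && (se.get? p.1 == some "safe")))
      PySem.Dict.empty
  PySem.Set.ofList ((group_safe.items.filter (fun p => p.2)).map Prod.fst)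

-- ===== PRECONDITION & SPEC =====
def Spec_compute_safe_groups_py (tool_group : List (String × String)) (tool_side_effect : List (String × String)) (out : List String) : Prop := out = compute_safe_groups_py_alt tool_group tool_side_effect
instance (tool_group : List (String × String)) (tool_side_effect : List (String × String)) (out : List String) : Decidable (Spec_compute_safe_groups_py tool_group tool_side_effect out) := by unfold Spec_compute_safe_groups_py; infer_instance

-- ===== CLAIM (what is proved, stated in full; the proofs are below) =====
def Claim_equal_compute_safe_groups_py : Prop := ∀ (tool_group : List (String × String)) (tool_side_effect : List (String × String)), Dom_compute_safe_groups_py tool_group tool_side_effect → Spec_compute_safe_groups_py tool_group tool_side_effect (compute_safe_groups_py tool_group tool_side_effect)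

-- ===== LEMMAS AND PROOFS =====

-- The two loops over tool_group keep their dictionaries in lock-step:
-- B's boolean at a group is "all of A's member list for that group is safe",
-- and every member list A keeps is non-empty.
theorem pv_inv (se : PySem.Dict String String) (L : List (String × String))
    (d1 : PySem.Dict String (List String)) (d2 : PySem.Dict String Bool)
    (hmap : d2.items = d1.items.map (fun p => (p.1, p.2.all (fun m => se.get? m == some "safe"))))
    (hne : ∀ p ∈ d1.items, p.2 ≠ []) :
    (L.foldl (fun d p => d.insert p.2 (d.getD p.2 true && (se.get? p.1 == some "safe"))) d2).items
      = (L.foldl (fun d p => d.modify p.2 [] (fun ms => ms ++ [p.1])) d1).items.map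
          (fun p => (p.1, p.2.all (fun m => se.get? m == some "safe")))
    ∧ ∀ p ∈ (L.foldl (fun d p => d.modify p.2 [] (fun ms => ms ++ [p.1])) d1).items, p.2 ≠ [] := by
  induction L generalizing d1 d2 with
  | nil => exact ⟨hmap, hne⟩
  | cons q L ih =>
    obtain ⟨n, g⟩ := q
    simp only [List.foldl_cons]
    have hcont : d2.contains g = d1.contains g := by
      simp [PySem.Dict.contains, hmap, List.any_map, Function.comp_def]
    have hget : d2.get? g = (d1.get? g).map (fun ms => ms.all (fun m => se.get? m == some "safe")) := by
      simp [PySem.Dict.get?, hmap, List.find?_map, Function.comp_def]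
    have hgetD : d2.getD g true = (d1.getD g []).all (fun m => se.get? m == some "safe") := by
      simp only [PySem.Dict.getD, hget]
      cases d1.get? g <;> simp
    apply ih
    · -- one-step preservation of the map relation
      simp only [PySem.Dict.modify, PySem.Dict.insert, hcont]
      by_cases h : d1.contains g = true
      · simp only [h, if_pos, hmap, List.map_map]
        apply List.map_congr_left
        intro p _
        by_cases hp : p.1 == g
        · simp [Function.comp, hp, hgetD, List.all_append]
        · simp [Function.comp, hp]
      · simp only [h, if_neg, hmap, List.map_append, Bool.false_eq_true, not_false_iff, hgetD]
        simp
    · -- one-step preservation of non-emptiness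
      intro p hp
      simp only [PySem.Dict.modify, PySem.Dict.insert] at hp
      by_cases h : d1.contains g = true
      · simp only [h, if_pos] at hp
        rcases List.mem_map.mp hp with ⟨q, hq, rfl⟩
        by_cases hq1 : q.1 == g
        · simp [hq1]
        · simp only [hq1, if_neg, Bool.false_eq_true, not_false_iff]
          exact hne q hq
      · simp only [h, if_neg, Bool.false_eq_true, not_false_iff, List.mem_append] at hp
        rcases hp with hp | hp
        · exact hne p hp
        · simp at hp; simp [hp]

-- Folding A's guarded set-insertion over member lists equals folding plain
-- insertion over the filtered boolean image, once every member list is non-empty.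
theorem pv_final (se : PySem.Dict String String) (l : List (String × List String))
    (hne : ∀ p ∈ l, p.2 ≠ []) (s : PySem.Set String) :
    l.foldl (fun safe p =>
        if (!p.2.isEmpty) && p.2.all (fun m => se.get? m == some "safe")
        then PySem.Set.add safe p.1 else safe) s
    = (((l.map (fun p => (p.1, p.2.all (fun m => se.get? m == some "safe")))).filter
          (fun p => p.2)).map Prod.fst).foldl PySem.Set.add s := by
  induction l generalizing s with
  | nil => rfl
  | cons q l ih =>
    obtain ⟨k, ms⟩ := q
    have hms : ms ≠ [] := hne (k, ms) (List.mem_cons_self)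
    have hns : ms.isEmpty = false := by simpa [List.isEmpty_iff] using hms
    by_cases hall : ms.all (fun m => se.get? m == some "safe") = true
    · simp only [List.foldl_cons, List.map_cons, List.filter_cons, hns, hall]
      simp only [Bool.not_false, Bool.true_and, if_pos]
      rw [ih (fun p hp => hne p (List.mem_cons_of_mem _ hp)) _]
      simp
    · simp only [List.foldl_cons, List.map_cons, List.filter_cons, hns,
        Bool.not_false, Bool.true_and, hall]
      rw [ih (fun p hp => hne p (List.mem_cons_of_mem _ hp)) _]
      simp

-- ===== VERDICT (by name: the statement is the Claim_ definition above) =====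
theorem compute_safe_groups_py_spec : Claim_equal_compute_safe_groups_py := by
  intro tool_group tool_side_effect _
  unfold Spec_compute_safe_groups_py compute_safe_groups_py compute_safe_groups_py_alt
  obtain ⟨hmap, hne⟩ := pv_inv (PySem.Dict.ofList tool_side_effect)
    (PySem.Dict.ofList tool_group).items PySem.Dict.empty PySem.Dict.empty (by rfl)
    (by intro p hp; simp [PySem.Dict.empty] at hp)
  rw [pv_final _ _ hne, ← hmap]
  rfl
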